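-- pv_equiv track=rewrite | github.com/otaku840726/agentic-rag-mcp | src/agentic_rag_mcp/utils.py | get_module_key
-- ===== SOURCE A (Python) =====
-- def get_module_key(path: str) -> str:
--     """
--     取 module 層級 - 支援多種專案結構
--     """
--     if not path:
--         return "unknown"
--
--     parts = path.split('/')
--
--     # Pattern 1: Java monorepo - modules/<name>/src/main/...
--     for i, p in enumerate(parts):
--         if p == 'modules' and i + 1 < len(parts):
--             return f"modules/{parts[i+1]}"
--
--     # Pattern 2: src/main 或 src/test - 往前回溯 1-2 層
--     for i, p in enumerate(parts):
--         if p == 'src' and i + 1 < len(parts) and parts[i+1] in ['main', 'test']: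
--             if i >= 1:
--                 return '/'.join(parts[max(0, i-1):i+1])
--
--     # Pattern 3: 常見頂層目錄
--     for i, p in enumerate(parts):
--         if p in ['services', 'apps', 'packages', 'libs', 'service']:
--             if i + 1 < len(parts):
--                 return f"{p}/{parts[i+1]}"
--
--     # Pattern 4: .NET project directories (e.g., Project.Module)
--     for i, p in enumerate(parts):
--         if '.' in p and p[0].isupper() and not p.endswith(('.cs', '.py', '.js', '.ts')):
--             return p
--
--     # Fallback: 前 3 段
--     return '/'.join(parts[:min(3, len(parts))])
-- ===== SOURCE B (Python) =====
-- def get_module_key(path: str) -> str: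
--     if not path:
--         return "unknown"
--     parts = path.split('/')
--     n = len(parts)
--     mod = src = top = dot = None
--     for i, p in enumerate(parts):
--         if mod is None and p == 'modules' and i + 1 < n:
--             mod = "modules/" + parts[i + 1]
--         if src is None and i >= 1 and p == 'src' and i + 1 < n and parts[i + 1] in ('main', 'test'):
--             src = parts[i - 1] + "/src"
--         if top is None and p in ('services', 'apps', 'packages', 'libs', 'service') and i + 1 < n:
--             top = p + "/" + parts[i + 1]
--         if dot is None and '.' in p and p[0].isupper() and not p.endswith(('.cs', '.py', '.js', '.ts')):
--             dot = p
--     if mod is not None: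
--         return mod
--     if src is not None:
--         return src
--     if top is not None:
--         return top
--     if dot is not None:
--         return dot
--     return '/'.join(parts[:3])
-- ===== Notes on version B (the rewrite author's own statement) =====
-- stated objective: alternative
-- what changed: A's four sequential early-return scans over the path segments are replaced by a single pass that fills four first-match candidate slots and resolves the priority order once after the loop.
import Mathlib
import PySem

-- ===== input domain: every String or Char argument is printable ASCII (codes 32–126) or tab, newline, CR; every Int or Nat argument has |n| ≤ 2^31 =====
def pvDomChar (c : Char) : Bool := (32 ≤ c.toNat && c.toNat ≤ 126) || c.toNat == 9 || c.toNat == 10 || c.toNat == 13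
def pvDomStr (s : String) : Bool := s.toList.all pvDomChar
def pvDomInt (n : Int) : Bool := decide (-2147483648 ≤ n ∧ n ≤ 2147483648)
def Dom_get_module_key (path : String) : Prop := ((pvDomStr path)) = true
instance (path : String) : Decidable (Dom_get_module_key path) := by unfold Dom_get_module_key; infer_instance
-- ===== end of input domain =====

-- B replaces A's four sequential early-return scans by ONE pass over the segments that fills four
-- first-match candidate slots, resolving the priority order once after the loop (objective: alternative).

-- ===== PORT A =====
-- Pattern 1 loop: modules/<next>
def pvA_loop1 (parts : List String) : List (Int × String) → Option String
  | [] => none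
  | (i, p) :: rest =>
    if p == "modules" && decide (i + 1 < (parts.length : Int)) then
      some ("modules/" ++ (PySem.List.pyGet? parts (i + 1)).getD "")
    else pvA_loop1 parts rest

-- Pattern 2 loop: src/main|test, backtrack one segment; i == 0 matches fall through (continue)
def pvA_loop2 (parts : List String) : List (Int × String) → Option String
  | [] => none
  | (i, p) :: rest =>
    if p == "src" && decide (i + 1 < (parts.length : Int)) &&
        ["main", "test"].contains ((PySem.List.pyGet? parts (i + 1)).getD "") then
      if decide (1 ≤ i) then
        some (PySem.Str.join "/" (PySem.List.slice parts (some (max 0 (i - 1))) (some (i + 1))))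
      else pvA_loop2 parts rest
    else pvA_loop2 parts rest

-- Pattern 3 loop: common top-level directories
def pvA_loop3 (parts : List String) : List (Int × String) → Option String
  | [] => none
  | (i, p) :: rest =>
    if ["services", "apps", "packages", "libs", "service"].contains p then
      if decide (i + 1 < (parts.length : Int)) then
        some (p ++ "/" ++ (PySem.List.pyGet? parts (i + 1)).getD "")
      else pvA_loop3 parts rest
    else pvA_loop3 parts rest

-- Pattern 4 loop: .NET-style segment ('.' in p, p[0] uppercase, no source-file suffix)
def pvA_loop4 : List (Int × String) → Option String
  | [] => none
  | (_, p) :: rest =>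
    if PySem.Str.isIn "." p &&
        (match PySem.Str.pyGet? p 0 with | some c => PySem.Chars.isupper c | none => false) &&
        !(PySem.Str.endswith p ".cs" || PySem.Str.endswith p ".py" ||
          PySem.Str.endswith p ".js" || PySem.Str.endswith p ".ts") then
      some p
    else pvA_loop4 rest

def get_module_key (path : String) : String :=
  if path == "" then "unknown"
  else
    let parts := (PySem.Str.split? path "/").getD []   -- sep "/" ≠ "", so split? is always some
    match pvA_loop1 parts (PySem.List.enumerate parts) with
    | some r => r
    | none =>
      match pvA_loop2 parts (PySem.List.enumerate parts) with
      | some r => r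
      | none =>
        match pvA_loop3 parts (PySem.List.enumerate parts) with
        | some r => r
        | none =>
          match pvA_loop4 (PySem.List.enumerate parts) with
          | some r => r
          | none =>
            PySem.Str.join "/" (PySem.List.slice parts none (some (min 3 (parts.length : Int))))

-- ===== PORT B =====
-- one step of B's single pass: fill each still-empty candidate slot on its first qualifying segment
def pvB_step (parts : List String)
    (st : Option String × Option String × Option String × Option String)
    (e : Int × String) : Option String × Option String × Option String × Option String :=
  let (mod, src, top, dot) := st
  let (i, p) := e
  let mod := if mod.isNone && (p == "modules" && decide (i + 1 < (parts.length : Int))) then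
      some ("modules/" ++ (PySem.List.pyGet? parts (i + 1)).getD "")
    else mod
  let src := if src.isNone && (decide (1 ≤ i) && p == "src" && decide (i + 1 < (parts.length : Int)) &&
        (((PySem.List.pyGet? parts (i + 1)).getD "" == "main") ||
         ((PySem.List.pyGet? parts (i + 1)).getD "" == "test"))) then
      some ((PySem.List.pyGet? parts (i - 1)).getD "" ++ "/src")
    else src
  let top := if top.isNone && (["services", "apps", "packages", "libs", "service"].contains p &&
        decide (i + 1 < (parts.length : Int))) then
      some (p ++ "/" ++ (PySem.List.pyGet? parts (i + 1)).getD "")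
    else top
  let dot := if dot.isNone && (PySem.Str.isIn "." p &&
        (match PySem.Str.pyGet? p 0 with | some c => PySem.Chars.isupper c | none => false) &&
        !(PySem.Str.endswith p ".cs" || PySem.Str.endswith p ".py" ||
          PySem.Str.endswith p ".js" || PySem.Str.endswith p ".ts")) then
      some p
    else dot
  (mod, src, top, dot)

def get_module_key_alt (path : String) : String :=
  if path == "" then "unknown"
  else
    let parts := (PySem.Str.split? path "/").getD []   -- sep "/" ≠ "", so split? is always some
    let st := (PySem.List.enumerate parts).foldl (pvB_step parts) (none, none, none, none)
    match st with
    | (some r, _, _, _) => r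
    | (none, some r, _, _) => r
    | (none, none, some r, _) => r
    | (none, none, none, some r) => r
    | (none, none, none, none) => PySem.Str.join "/" (PySem.List.slice parts none (some 3))

-- ===== PRECONDITION & SPEC =====
def Spec_get_module_key (path : String) (out : String) : Prop := out = get_module_key_alt path
instance (path : String) (out : String) : Decidable (Spec_get_module_key path out) := by unfold Spec_get_module_key; infer_instance

-- ===== CLAIM (what is proved, stated in full; the proofs are below) =====
def Claim_equal_get_module_key : Prop := ∀ (path : String), Dom_get_module_key path → Spec_get_module_key path (get_module_key path)

-- ===== LEMMAS AND PROOFS =====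

-- pattern-2 value: join of the two-element slice equals "previous segment ++ '/src'"
lemma pv_slot2_val (parts : List String) (k : Nat) (hk : k < parts.length) (h1 : 1 ≤ k)
    (hsrc : parts[k] = "src") :
    PySem.Str.join "/" (PySem.List.slice parts (some (max 0 ((k : Int) - 1))) (some ((k : Int) + 1)))
      = (PySem.List.pyGet? parts ((k : Int) - 1)).getD "" ++ "/src" := by
  have hm : max 0 ((k : Int) - 1) = ((k - 1 : Nat) : Int) := by omega
  have hb : (k : Int) + 1 = ((k + 1 : Nat) : Int) := by omega
  have hg : ((k : Int) - 1) = ((k - 1 : Nat) : Int) := by omega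
  rw [hm, hb, hg, PySem.List.slice_natCast, PySem.List.pyGet?_natCast]
  have hdrop : parts.drop (k - 1) = parts[k - 1] :: parts[k] :: parts.drop (k + 1) := by
    rw [List.drop_eq_getElem_cons (by omega)]
    congr 1
    have : k - 1 + 1 = k := by omega
    rw [this, List.drop_eq_getElem_cons (by omega)]
  have h2 : k + 1 - (k - 1) = 2 := by omega
  rw [h2, hdrop, hsrc]
  simp only [List.take_succ_cons, List.take_zero, List.getElem?_eq_getElem (by omega : k - 1 < parts.length)]
  apply String.toList_injective
  rw [PySem.Str.toList_join]
  simp [PySem.Chars.join, List.intercalate]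

-- the fallback slices agree: parts[:min(3, len)] = parts[:3]
lemma pv_fallback (parts : List String) :
    PySem.List.slice parts none (some (min 3 (parts.length : Int)))
      = PySem.List.slice parts none (some 3) := by
  by_cases h : parts.length ≤ 3
  · rw [PySem.List.slice_to _ (by omega), PySem.List.slice_to _ (by omega)]
    have h1 : (min 3 (parts.length : Int)).toNat = parts.length := by omega
    have h2 : ((3 : Int)).toNat = 3 := by omega
    rw [h1, h2, List.take_length, List.take_of_length_le h]
  · have : min 3 (parts.length : Int) = 3 := by omega
    rw [this]

-- B's single pass computes, slot by slot, exactly the results of A's four scans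
lemma pv_go_eq (parts : List String) (l : List (Int × String))
    (hP : ∀ x ∈ l, ∃ k : Nat, ∃ h : k < parts.length, x = ((k : Int), parts[k])) :
    ∀ a b c d, l.foldl (pvB_step parts) (a, b, c, d)
      = (a.or (pvA_loop1 parts l), b.or (pvA_loop2 parts l),
         c.or (pvA_loop3 parts l), d.or (pvA_loop4 l)) := by
  induction l with
  | nil => intro a b c d; simp [pvA_loop1, pvA_loop2, pvA_loop3, pvA_loop4]
  | cons x rest ih =>
    intro a b c d
    obtain ⟨k, hk, rfl⟩ := hP x (List.mem_cons_self ..)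
    have hPr : ∀ y ∈ rest, ∃ k : Nat, ∃ h : k < parts.length, y = ((k : Int), parts[k]) :=
      fun y hy => hP y (List.mem_cons_of_mem _ hy)
    rw [List.foldl_cons, pvB_step, ih hPr]
    simp only [pvA_loop1, pvA_loop2, pvA_loop3, pvA_loop4]
    congr 1
    · -- slot 1
      cases a with
      | some r => simp
      | none => by_cases h : (parts[k] == "modules" && decide ((k : Int) + 1 < (parts.length : Int))) = true <;> simp [h]
    congr 1
    · -- slot 2
      cases b with
      | some r => simp
      | none =>
        by_cases hs : parts[k] = "src"
        · by_cases hl : ((k : Int) + 1 < (parts.length : Int))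
          · by_cases hm : ((PySem.List.pyGet? parts ((k : Int) + 1)).getD "" = "main" ∨
                (PySem.List.pyGet? parts ((k : Int) + 1)).getD "" = "test")
            · by_cases h1 : (1 : Int) ≤ (k : Int)
              · have hv := pv_slot2_val parts k hk (by exact_mod_cast h1) hs
                have hmax : max 0 ((k : Int) - 1) = (k : Int) - 1 := by omega
                rw [hmax] at hv
                simp [hs, hl, hm, h1, hv]
              · simp [hs, hl, hm, h1]
            · simp [hs, hl, hm]
          · simp [hs, hl]
        · simp [hs]
    congr 1
    · -- slot 3
      cases c with
      | some r => simp
      | none =>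
        by_cases h : (parts[k] = "services" ∨ parts[k] = "apps" ∨ parts[k] = "packages" ∨
            parts[k] = "libs" ∨ parts[k] = "service")
        · by_cases hl : ((k : Int) + 1 < (parts.length : Int)) <;> simp [h, hl]
        · simp [h]
    · -- slot 4
      cases d with
      | some r => simp
      | none =>
        simp only [Option.isNone_none, Bool.true_and]
        split_ifs with h <;> simp

-- ===== VERDICT (by name: the statement is the Claim_ definition above) =====
theorem get_module_key_spec : Claim_equal_get_module_key := by
  intro path _
  unfold Spec_get_module_key get_module_key get_module_key_alt
  by_cases hp : path == ""
  · simp [hp]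
  · simp only [hp, Bool.false_eq_true, if_false]
    set parts := (PySem.Str.split? path "/").getD [] with hparts
    have hP : ∀ x ∈ PySem.List.enumerate parts, ∃ k : Nat, ∃ h : k < parts.length,
        x = ((k : Int), parts[k]) := by
      intro x hx
      rw [PySem.List.mem_enumerate_iff] at hx
      obtain ⟨k, h, rfl⟩ := hx
      exact ⟨k, h, by simp⟩
    rw [pv_go_eq parts _ hP none none none none]
    simp only [Option.none_or]
    cases pvA_loop1 parts (PySem.List.enumerate parts) with
    | some r => rfl
    | none =>
      cases pvA_loop2 parts (PySem.List.enumerate parts) with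
      | some r => rfl
      | none =>
        cases pvA_loop3 parts (PySem.List.enumerate parts) with
        | some r => rfl
        | none =>
          cases pvA_loop4 (PySem.List.enumerate parts) with
          | some r => rfl
          | none => rw [pv_fallback]
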